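-- pv_equiv track=rewrite | github.com/nikitabolkar123/daily_practice_problems | mon_tue_wed_pblms/algo_and_logical/prac.py | is_shuffled_well
-- ===== SOURCE A (Python) =====
-- def is_shuffled_well(lst):
--     count = 1
--     prev_no = lst[0]
--     for i in range(1, len(lst)):
--         num = lst[i]
--         if num == prev_no + 1 or num == prev_no - 1:
--             count += 1
--             if count >= 3:
--                 return False  # means consecutive no
--         else:
--             count = 1
--         prev_no = num
--
--     return True
-- ===== SOURCE B (Python) =====
-- def is_shuffled_well(lst):
--     flags = [abs(b - a) == 1 for a, b in zip(lst, lst[1:])]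
--     return not any(f and g for f, g in zip(flags, flags[1:]))
-- ===== Notes on version B (the rewrite author's own statement) =====
-- stated objective: alternative
-- what changed: B precomputes the list of adjacency flags for consecutive pairs and then scans for two adjacent True flags, instead of A's single pass with a running run-length counter.
import Mathlib
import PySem

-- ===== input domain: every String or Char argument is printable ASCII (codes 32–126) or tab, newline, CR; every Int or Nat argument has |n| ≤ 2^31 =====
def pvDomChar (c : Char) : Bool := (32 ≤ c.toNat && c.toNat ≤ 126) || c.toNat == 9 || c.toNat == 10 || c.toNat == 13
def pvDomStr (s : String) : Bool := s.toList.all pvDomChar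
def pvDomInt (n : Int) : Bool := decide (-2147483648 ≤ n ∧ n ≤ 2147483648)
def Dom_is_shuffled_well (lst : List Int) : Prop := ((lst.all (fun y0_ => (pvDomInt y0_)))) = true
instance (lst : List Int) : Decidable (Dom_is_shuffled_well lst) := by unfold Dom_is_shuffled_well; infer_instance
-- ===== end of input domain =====

-- B replaces A's running run-length counter by a two-phase pass: build the list of
-- consecutive-adjacency flags, then scan it for two adjacent True flags (objective: alternative).

-- ===== PORT A =====
-- the for-loop of A: state is (count, prev_no)
def pvGoA (count : Int) (prev : Int) : List Int → Bool
  | [] => true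
  | num :: rest =>
    if num == prev + 1 || num == prev - 1 then
      if count + 1 ≥ 3 then false
      else pvGoA (count + 1) num rest
    else pvGoA 1 num rest

def is_shuffled_well (lst : List Int) : Bool :=
  match lst with
  | [] => true            -- Python raises IndexError on lst[0] here; excluded by Pre_
  | p :: rest => pvGoA 1 p rest

-- ===== PORT B =====
-- flags = [abs(b - a) == 1 for a, b in zip(lst, lst[1:])]
def pvFlags (lst : List Int) : List Bool :=
  (lst.zip lst.tail).map (fun p => decide ((p.2 - p.1).natAbs = 1))

-- any(f and g for f, g in zip(flags, flags[1:]))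
def pvHasPair (fl : List Bool) : Bool :=
  (fl.zip fl.tail).any (fun p => p.1 && p.2)

def is_shuffled_well_alt (lst : List Int) : Bool :=
  !(pvHasPair (pvFlags lst))

-- ===== PRECONDITION & SPEC =====
-- Pre_ excludes only the empty list, on which A raises IndexError.
def Pre_is_shuffled_well (lst : List Int) : Prop := lst ≠ []
instance (lst : List Int) : Decidable (Pre_is_shuffled_well lst) := by unfold Pre_is_shuffled_well; infer_instance
def pvWitness_is_shuffled_well : List Int := ([1, 3, 5])

def Spec_is_shuffled_well (lst : List Int) (out : Bool) : Prop := out = is_shuffled_well_alt lst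
instance (lst : List Int) (out : Bool) : Decidable (Spec_is_shuffled_well lst out) := by unfold Spec_is_shuffled_well; infer_instance

-- ===== CLAIM (what is proved, stated in full; the proofs are below) =====
def Claim_equal_is_shuffled_well : Prop := ∀ (lst : List Int), Dom_is_shuffled_well lst → Pre_is_shuffled_well lst → Spec_is_shuffled_well lst (is_shuffled_well lst)

-- ===== LEMMAS AND PROOFS =====
lemma pvAdjb (a p : Int) : ((a == p + 1) || (a == p - 1)) = decide ((a - p).natAbs = 1) := by
  by_cases h : (a - p).natAbs = 1
  · simp only [h, decide_true]
    have : a = p + 1 ∨ a = p - 1 := by omega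
    rcases this with h' | h' <;> simp [h']
  · simp only [h, decide_false]
    have h1 : a ≠ p + 1 := by omega
    have h2 : a ≠ p - 1 := by omega
    simp [h1, h2]

lemma pvFlags_cons_cons (a b : Int) (t : List Int) :
    pvFlags (a :: b :: t) = decide ((b - a).natAbs = 1) :: pvFlags (b :: t) := by
  simp [pvFlags]

lemma pvHasPair_cons_cons (f g : Bool) (t : List Bool) :
    pvHasPair (f :: g :: t) = ((f && g) || pvHasPair (g :: t)) := by
  simp [pvHasPair]

-- head flag of the suffix starting at prev
def pvHeadAdj (prev : Int) : List Int → Bool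
  | [] => false
  | n :: _ => decide ((n - prev).natAbs = 1)

lemma pvGoA_eq (l : List Int) : ∀ (b : Bool) (prev : Int),
    pvGoA (if b then 2 else 1) prev l = !((b && pvHeadAdj prev l) || pvHasPair (pvFlags (prev :: l))) := by
  induction l with
  | nil =>
    intro b prev
    cases b <;> simp [pvGoA, pvHeadAdj, pvHasPair, pvFlags]
  | cons n t ih =>
    intro b prev
    by_cases hadj : (n - prev).natAbs = 1
    · cases b with
      | true =>
        have h0 : pvGoA 2 prev (n :: t) = false := by
          simp [pvGoA, pvAdjb, hadj]
        rw [show (if true then (2:Int) else 1) = 2 by simp, h0]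
        simp [pvHeadAdj, hadj]
      | false =>
        have hstep : pvGoA 1 prev (n :: t) = pvGoA 2 n t := by
          simp [pvGoA, pvAdjb, hadj]
        have ih' := ih true n
        rw [if_pos rfl] at ih'
        rw [show (if false then (2:Int) else 1) = 1 by simp, hstep, ih',
            pvFlags_cons_cons]
        cases t with
        | nil => simp [pvHeadAdj, pvFlags, pvHasPair, hadj]
        | cons m t' =>
          rw [pvFlags_cons_cons, pvHasPair_cons_cons]
          simp [pvHeadAdj, hadj]
    · have hstep : pvGoA (if b then 2 else 1) prev (n :: t) = pvGoA 1 n t := by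
        cases b <;> simp [pvGoA, pvAdjb, hadj]
      have ih' := ih false n
      rw [if_neg (by simp)] at ih'
      rw [hstep, ih', pvFlags_cons_cons]
      cases t with
      | nil => simp [pvHeadAdj, pvFlags, pvHasPair, hadj]
      | cons m t' =>
        rw [pvFlags_cons_cons, pvHasPair_cons_cons]
        simp [pvHeadAdj, hadj]

-- ===== VERDICT (by name: the statement is the Claim_ definition above) =====
theorem is_shuffled_well_spec : Claim_equal_is_shuffled_well := by
  intro lst _ hpre
  unfold Spec_is_shuffled_well
  match lst with
  | [] => exact absurd rfl hpre
  | p :: rest =>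
    show pvGoA 1 p rest = is_shuffled_well_alt (p :: rest)
    have := pvGoA_eq rest false p
    rw [if_neg (by simp)] at this
    rw [this]
    simp [is_shuffled_well_alt]
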